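-- pv_equiv track=rewrite | github.com/Ivan1248/irap-vietnam-360 | irap_video_cutting/shared/stem_index.py | _lookup_by_prefix
-- ===== SOURCE A (Python) =====
-- from typing import Dict, Set
--
-- def _lookup_by_prefix(
--     stem_index: Dict[str, str],
--     prefix: str,
-- ) -> tuple[str, str] | None:
--     """
--     Look up a video by exact stem or unambiguous prefix.
--
--     Returns ``(matched_stem, path)`` on success, or ``None`` if the prefix
--     matches zero or more than one stem.
--     """
--     # Exact match — fast path.
--     if prefix in stem_index:
--         return prefix, stem_index[prefix]
--
--     matches = [(s, p) for s, p in stem_index.items() if s.startswith(prefix)]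
--     if len(matches) == 1:
--         return matches[0]
--     return None
-- ===== SOURCE B (Python) =====
-- def _lookup_by_prefix(
--     stem_index,
--     prefix,
-- ):
--     """Sorted-key binary search: keys starting with ``prefix`` form a
--     contiguous block beginning at the first key >= prefix, so after the
--     search only two positions need inspecting."""
--     keys = sorted(stem_index)
--     lo, hi = 0, len(keys)
--     while lo < hi:
--         mid = (lo + hi) // 2
--         if keys[mid] < prefix:
--             lo = mid + 1
--         else:
--             hi = mid
--     if lo == len(keys) or not keys[lo].startswith(prefix):
--         return None
--     if keys[lo] == prefix:
--         return prefix, stem_index[prefix]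
--     if lo + 1 < len(keys) and keys[lo + 1].startswith(prefix):
--         return None
--     return keys[lo], stem_index[keys[lo]]
-- ===== Notes on version B (the rewrite author's own statement) =====
-- stated objective: alternative
-- what changed: Replaces A's dict membership test plus full linear filter scan with sorting the keys once and binary-searching for the first key >= prefix: the prefix matches form a contiguous block there, so only the two keys at that position are inspected (exact match, unique match, or ambiguity).
import Mathlib
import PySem

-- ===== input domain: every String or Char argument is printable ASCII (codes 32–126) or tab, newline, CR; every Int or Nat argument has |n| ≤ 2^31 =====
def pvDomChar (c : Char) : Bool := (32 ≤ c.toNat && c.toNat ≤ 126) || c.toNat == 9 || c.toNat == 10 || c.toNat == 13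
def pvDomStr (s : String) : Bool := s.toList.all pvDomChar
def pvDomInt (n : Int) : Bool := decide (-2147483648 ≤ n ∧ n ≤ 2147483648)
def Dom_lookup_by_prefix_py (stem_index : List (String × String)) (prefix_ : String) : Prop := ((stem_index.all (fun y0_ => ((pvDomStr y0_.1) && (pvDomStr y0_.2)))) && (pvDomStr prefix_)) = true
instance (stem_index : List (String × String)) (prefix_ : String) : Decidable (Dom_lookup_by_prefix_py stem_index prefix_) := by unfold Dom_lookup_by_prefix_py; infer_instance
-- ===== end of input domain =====

-- B replaces A's full linear scan by one sort plus a binary search: the keys starting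
-- with the prefix form a contiguous block of the sorted key list beginning at the first
-- key ≥ prefix, so only the two keys at that position need inspecting.

-- ===== PORT A =====
def lookup_by_prefix_py (stem_index : List (String × String)) (prefix_ : String) : Option (String × String) :=
  match List.lookup prefix_ stem_index with
  | some v => some (prefix_, v)
  | none =>
    let ms := stem_index.filter (fun sp => PySem.Str.startswith sp.1 prefix_)
    if ms.length = 1 then ms.head? else none

-- ===== PORT B =====
-- Source B's hand-written bisect_left loop (the bisect module is not imported by the
-- original file, so B hand-writes the loop); keys[mid] is always in range when the
-- loop body runs, so getD is exact there.
def pvBisect (keys : List String) (prefix_ : String) (lo hi : Nat) : Nat :=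
  if lo < hi then
    if keys.getD ((lo + hi) / 2) "" < prefix_ then pvBisect keys prefix_ ((lo + hi) / 2 + 1) hi
    else pvBisect keys prefix_ lo ((lo + hi) / 2)
  else lo
termination_by hi - lo
decreasing_by all_goals omega

def lookup_by_prefix_py_alt (stem_index : List (String × String)) (prefix_ : String) : Option (String × String) :=
  let keys := PySem.List.sorted (stem_index.map Prod.fst) (fun s => s) false
  let lo := pvBisect keys prefix_ 0 keys.length
  match keys[lo]? with
  | none => none                              -- lo == len(keys)
  | some k =>
    if PySem.Str.startswith k prefix_ = false then none
    else if k = prefix_ then (List.lookup prefix_ stem_index).map (fun v => (prefix_, v))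
    else
      match keys[lo + 1]? with
      | some k2 =>
        if PySem.Str.startswith k2 prefix_ then none
        else (List.lookup k stem_index).map (fun v => (k, v))
      | none => (List.lookup k stem_index).map (fun v => (k, v))

-- ===== PRECONDITION & SPEC =====
def Spec_lookup_by_prefix_py (stem_index : List (String × String)) (prefix_ : String) (out : Option (String × String)) : Prop := out = lookup_by_prefix_py_alt stem_index prefix_
instance (stem_index : List (String × String)) (prefix_ : String) (out : Option (String × String)) : Decidable (Spec_lookup_by_prefix_py stem_index prefix_ out) := by unfold Spec_lookup_by_prefix_py; infer_instance

-- ===== CLAIM (what is proved, stated in full; the proofs are below) =====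
def Claim_equal_lookup_by_prefix_py : Prop := ∀ (stem_index : List (String × String)) (prefix_ : String), Dom_lookup_by_prefix_py stem_index prefix_ → Spec_lookup_by_prefix_py stem_index prefix_ (lookup_by_prefix_py stem_index prefix_)

-- ===== LEMMAS AND PROOFS =====

-- A prefix of s is lexicographically ≤ s.
theorem pvNotLtOfPrefix : ∀ (p s : List Char), p <+: s → ¬ List.Lex (· < ·) s p := by
  intro p
  induction p with
  | nil => intro s _ h; cases h
  | cons c p' ih =>
    intro s hp h
    obtain ⟨r, hr⟩ := hp
    subst hr
    cases h with
    | rel h => exact lt_irrefl _ h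
    | cons h => exact ih _ ⟨r, rfl⟩ h

-- The strings of which p is a prefix form an interval of the lexicographic order.
theorem pvPrefixInterval : ∀ (p s t : List Char), ¬ List.Lex (· < ·) s p → ¬ List.Lex (· < ·) t s →
    p <+: t → p <+: s := by
  intro p
  induction p with
  | nil => intro s _ _ _ _; exact List.nil_prefix
  | cons c p' ih =>
    intro s t hsp hts hpt
    obtain ⟨r, hr⟩ := hpt
    subst hr
    cases s with
    | nil => exact absurd List.Lex.nil hsp
    | cons a s' =>
      have hac : ¬ a < c := fun h => hsp (List.Lex.rel h)
      have hca : ¬ c < a := fun h => hts (List.Lex.rel h)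
      have : a = c := le_antisymm (not_lt.mp hca) (not_lt.mp hac)
      subst this
      have h1 : ¬ List.Lex (· < ·) s' p' := fun h => hsp (List.Lex.cons h)
      have h2 : ¬ List.Lex (· < ·) (p' ++ r) s' := fun h => hts (List.Lex.cons h)
      obtain ⟨u, hu⟩ := ih s' (p' ++ r) h1 h2 ⟨r, rfl⟩
      exact ⟨u, by rw [List.cons_append, hu]⟩

-- String versions of the two lexicographic facts.
theorem pvNotLt_of_startswith {p s : String} (h : PySem.Str.startswith s p = true) : ¬ s < p := by
  rw [PySem.Str.startswith_eq, PySem.Chars.startswith_iff] at h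
  rw [String.lt_iff_toList_lt]
  exact pvNotLtOfPrefix _ _ h

theorem pvStartswith_interval {p s t : String} (h1 : ¬ s < p) (h2 : s ≤ t)
    (h3 : PySem.Str.startswith t p = true) : PySem.Str.startswith s p = true := by
  rw [PySem.Str.startswith_eq, PySem.Chars.startswith_iff] at h3 ⊢
  rw [String.lt_iff_toList_lt] at h1
  have h2' : ¬ t < s := not_lt.mpr h2
  rw [String.lt_iff_toList_lt] at h2'
  exact pvPrefixInterval _ _ _ h1 h2' h3

theorem pvStartswith_self (s : String) : PySem.Str.startswith s s = true := by
  rw [PySem.Str.startswith_eq, PySem.Chars.startswith_iff]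

-- The binary-search invariant: pvBisect returns the first position whose key is ≥ prefix.
theorem pvBisect_spec (S : List String) (p : String)
    (hmono : ∀ i j (hi : i < S.length) (hj : j < S.length), i ≤ j → S[i] ≤ S[j]) :
    ∀ fuel lo hi, hi - lo ≤ fuel → lo ≤ hi → hi ≤ S.length →
      (∀ j (hj : j < S.length), j < lo → S[j] < p) →
      (∀ j (hj : j < S.length), hi ≤ j → ¬ S[j] < p) →
      pvBisect S p lo hi ≤ S.length ∧
      (∀ j (hj : j < S.length), j < pvBisect S p lo hi → S[j] < p) ∧
      (∀ j (hj : j < S.length), pvBisect S p lo hi ≤ j → ¬ S[j] < p) := by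
  intro fuel
  induction fuel with
  | zero =>
    intro lo hi hfuel hlh hhl hbelow habove
    have : ¬ lo < hi := by omega
    rw [pvBisect, if_neg this]
    exact ⟨by omega, hbelow, fun j hj hja => habove j hj (by omega)⟩
  | succ fuel ih =>
    intro lo hi hfuel hlh hhl hbelow habove
    by_cases hc : lo < hi
    · have hmidlen : (lo + hi) / 2 < S.length := by omega
      rw [pvBisect, if_pos hc, List.getD_eq_getElem S "" hmidlen]
      by_cases hlt : S[(lo + hi) / 2] < p
      · rw [if_pos hlt]
        refine ih ((lo + hi) / 2 + 1) hi (by omega) (by omega) hhl ?_ habove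
        intro j hj hjm
        exact lt_of_le_of_lt (hmono j ((lo + hi) / 2) hj hmidlen (by omega)) hlt
      · rw [if_neg hlt]
        refine ih lo ((lo + hi) / 2) (by omega) (by omega) (by omega) hbelow ?_
        intro j hj hjm hjp
        exact hlt (lt_of_le_of_lt (hmono ((lo + hi) / 2) j hmidlen hj hjm) hjp)
    · rw [pvBisect, if_neg hc]
      exact ⟨by omega, hbelow, fun j hj hja => habove j hj (by omega)⟩

-- Filtering on the key commutes with projecting the keys.
theorem pvFilter_map_fst (L : List (String × String)) (p : String) :
    List.filter (fun s => PySem.Str.startswith s p) (L.map Prod.fst)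
      = (L.filter (fun sp => PySem.Str.startswith sp.1 p)).map Prod.fst := by
  rw [List.filter_map]
  rfl

-- If the key-filter keeps exactly one pair, dict lookup of its key returns its value.
theorem pvLookup_of_filter_singleton (q : String → Bool) :
    ∀ (L : List (String × String)) (k : String) (v : String), q k = true →
      L.filter (fun sp => q sp.1) = [(k, v)] → List.lookup k L = some v := by
  intro L
  induction L with
  | nil => intro k v _ h; simp at h
  | cons a tl ih =>
    intro k v hqk h
    by_cases hqa : q a.1 = true
    · rw [show List.filter (fun sp => q sp.1) (a :: tl) = a :: List.filter (fun sp => q sp.1) tl from List.filter_cons_of_pos hqa] at h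
      rw [List.cons.injEq] at h
      obtain ⟨ha, _⟩ := h
      subst ha
      simp [List.lookup]
    · rw [show List.filter (fun sp => q sp.1) (a :: tl) = List.filter (fun sp => q sp.1) tl from List.filter_cons_of_neg (by simp [hqa])] at h
      have hne : (k == a.1) = false := by
        rw [beq_eq_false_iff_ne]
        intro he
        exact hqa (he ▸ hqk)
      cases a with
      | mk a1 a2 => simpa [List.lookup, hne] using ih k v hqk h


-- If no key starts with the prefix, both the dict lookup and the filter are empty.
theorem pvEmptyCase (L : List (String × String)) (p : String) (S : List String)
    (hperm : S.Perm (L.map Prod.fst))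
    (hall : ∀ j (hj : j < S.length), PySem.Str.startswith S[j] p = false) :
    List.lookup p L = none ∧ L.filter (fun sp => PySem.Str.startswith sp.1 p) = [] := by
  have hq_all : ∀ x ∈ S, PySem.Str.startswith x p = false := by
    intro x hx
    obtain ⟨j, hj, he⟩ := List.mem_iff_getElem.mp hx
    rw [← he]; exact hall j hj
  have hM : S.filter (fun s => PySem.Str.startswith s p) = [] := by
    rw [List.filter_eq_nil_iff]
    intro x hx hq
    change PySem.Str.startswith x p = true at hq
    rw [hq_all x hx] at hq
    cases hq
  have hMF : (S.filter (fun s => PySem.Str.startswith s p)).Perm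
      ((L.filter (fun sp => PySem.Str.startswith sp.1 p)).map Prod.fst) := by
    have h := hperm.filter (fun s => PySem.Str.startswith s p)
    rw [pvFilter_map_fst] at h
    exact h
  rw [hM] at hMF
  have hF : L.filter (fun sp => PySem.Str.startswith sp.1 p) = [] := by
    have h1 : (L.filter (fun sp => PySem.Str.startswith sp.1 p)).map Prod.fst = [] :=
      (hMF.symm).eq_nil
    exact List.map_eq_nil_iff.mp h1
  refine ⟨?_, hF⟩
  rw [List.lookup_eq_none_iff]
  intro pair hpair
  rw [bne_iff_ne]
  intro he
  have hmS : p ∈ S := hperm.mem_iff.mpr (List.mem_map.mpr ⟨pair, hpair, he.symm⟩)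
  have hfalse := hq_all p hmS
  rw [pvStartswith_self] at hfalse
  cases hfalse

-- If exactly the key at position r starts with the prefix, the filter is that
-- single pair and the dict lookup of that key returns its value.
theorem pvUniqueCase (L : List (String × String)) (p : String) (S : List String) (r : Nat)
    (hperm : S.Perm (L.map Prod.fst)) (hr : r < S.length)
    (hqk : PySem.Str.startswith S[r] p = true)
    (hbelowq : ∀ j (hj : j < S.length), j < r → PySem.Str.startswith S[j] p = false)
    (htail : ∀ j (hj : j < S.length), r + 1 ≤ j → PySem.Str.startswith S[j] p = false) :
    ∃ v, List.lookup S[r] L = some v ∧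
      (L.filter (fun sp => PySem.Str.startswith sp.1 p)).length = 1 ∧
      (L.filter (fun sp => PySem.Str.startswith sp.1 p)).head? = some (S[r], v) := by
  have hM : S.filter (fun s => PySem.Str.startswith s p) = [S[r]] := by
    have e1 : S.drop r = S[r] :: S.drop (r + 1) := List.drop_eq_getElem_cons hr
    have hSdec := List.take_append_drop r S
    rw [e1] at hSdec
    conv_lhs => rw [← hSdec]
    rw [List.filter_append]
    have h1 : (S.take r).filter (fun s => PySem.Str.startswith s p) = [] := by
      rw [List.filter_eq_nil_iff]
      intro x hx
      rw [List.mem_take_iff_getElem] at hx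
      obtain ⟨i, hi, he⟩ := hx
      intro hq
      change PySem.Str.startswith x p = true at hq
      rw [← he] at hq
      rw [hbelowq i (by omega) (by omega)] at hq
      cases hq
    have h2 : (S.drop (r + 1)).filter (fun s => PySem.Str.startswith s p) = [] := by
      rw [List.filter_eq_nil_iff]
      intro x hx
      rw [List.mem_drop_iff_getElem] at hx
      obtain ⟨i, hi, he⟩ := hx
      intro hq
      change PySem.Str.startswith x p = true at hq
      rw [← he] at hq
      rw [htail (r + 1 + i) (by omega) (by omega)] at hq
      cases hq
    rw [h1, show List.filter (fun s => PySem.Str.startswith s p) (S[r] :: S.drop (r + 1))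
      = S[r] :: List.filter (fun s => PySem.Str.startswith s p) (S.drop (r + 1)) from
        List.filter_cons_of_pos hqk, h2]
    rfl
  have hMF : (S.filter (fun s => PySem.Str.startswith s p)).Perm
      ((L.filter (fun sp => PySem.Str.startswith sp.1 p)).map Prod.fst) := by
    have h := hperm.filter (fun s => PySem.Str.startswith s p)
    rw [pvFilter_map_fst] at h
    exact h
  rw [hM] at hMF
  have hF1 : (L.filter (fun sp => PySem.Str.startswith sp.1 p)).length = 1 := by
    have hl := hMF.length_eq
    rw [List.length_map] at hl
    simpa using hl.symm
  obtain ⟨x, hx⟩ := List.length_eq_one_iff.mp hF1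
  have h3 := hMF
  rw [hx] at h3
  have h4 : [S[r]] = [x.1] := List.Perm.eq_singleton (by simpa using h3)
  have hxfst : x.1 = S[r] := by injection h4 with h5 _; exact h5.symm
  refine ⟨x.2, ?_, hF1, ?_⟩
  · refine pvLookup_of_filter_singleton (fun s => PySem.Str.startswith s p) L S[r] x.2 hqk ?_
    exact hx.trans (by rw [← hxfst])
  · rw [hx, List.head?_cons, ← hxfst]

-- ===== VERDICT (by name: the statement is the Claim_ definition above) =====
theorem lookup_by_prefix_py_spec : Claim_equal_lookup_by_prefix_py := by
  intro L p _
  unfold Spec_lookup_by_prefix_py lookup_by_prefix_py lookup_by_prefix_py_alt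
  dsimp only
  set S := PySem.List.sorted (L.map Prod.fst) (fun s => s) false with hSdef
  have hperm : S.Perm (L.map Prod.fst) := PySem.List.sorted_perm _ _ _
  have hpw : S.Pairwise (· ≤ ·) := PySem.List.sorted_pairwise _ _
  have hmono : ∀ i j (hi : i < S.length) (hj : j < S.length), i ≤ j → S[i] ≤ S[j] := by
    intro i j hi hj hij
    rcases Nat.eq_or_lt_of_le hij with rfl | h
    · exact le_refl _
    · exact List.pairwise_iff_getElem.mp hpw i j hi hj h
  obtain ⟨hrlen, hbelow, habove⟩ :=
    pvBisect_spec S p hmono S.length 0 S.length (by omega) (by omega) (le_refl _)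
      (fun j hj hj0 => absurd hj0 (Nat.not_lt_zero j))
      (fun j hj hle => absurd hj (by omega))
  set r := pvBisect S p 0 S.length with hrdef
  have hq_below : ∀ j (hj : j < S.length), j < r → PySem.Str.startswith S[j] p = false := by
    intro j hj hjr
    rw [← Bool.not_eq_true]
    intro hq
    exact pvNotLt_of_startswith hq (hbelow j hj hjr)
  have hq_above : ∀ i (hi : i < S.length), r ≤ i → PySem.Str.startswith S[i] p = false →
      ∀ j (hj : j < S.length), i ≤ j → PySem.Str.startswith S[j] p = false := by
    intro i hi hir hqi j hj hij
    rw [← Bool.not_eq_true]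
    intro hq
    have h := pvStartswith_interval (habove i hi hir) (hmono i j hi hj hij) hq
    rw [hqi] at h
    cases h
  rcases Nat.lt_or_ge r S.length with hr | hr
  · rw [List.getElem?_eq_getElem hr]
    dsimp only
    by_cases hqk : PySem.Str.startswith S[r] p = true
    · by_cases hkp : S[r] = p
      · -- exact match
        have hm : p ∈ L.map Prod.fst := hperm.mem_iff.mp (hkp ▸ List.getElem_mem hr)
        obtain ⟨pair, hpair, hfst⟩ := List.mem_map.mp hm
        have hsome : (List.lookup p L).isSome :=
          List.lookup_isSome_iff.mpr ⟨pair, hpair, beq_iff_eq.mpr hfst.symm⟩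
        obtain ⟨v, hv⟩ := Option.isSome_iff_exists.mp hsome
        rw [hv]
        dsimp only
        rw [if_neg (show ¬ (PySem.Str.startswith S[r] p = false) from by rw [hqk]; decide),
          if_pos hkp]
        rfl
      · -- k starts with p but is not p itself: p is not a key
        have hp_nm : p ∉ L.map Prod.fst := by
          intro hm
          obtain ⟨j, hj, he⟩ := List.mem_iff_getElem.mp (hperm.mem_iff.mpr hm)
          rcases Nat.lt_or_ge j r with hjr | hjr
          · have hl := hbelow j hj hjr
            rw [he] at hl
            exact lt_irrefl p hl
          · have h1 : p ≤ S[r] := not_lt.mp (habove r hr (le_refl r))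
            have h2 : S[r] ≤ S[j] := hmono r j hr hj hjr
            exact hkp (le_antisymm (he ▸ h2) h1)
        have hlknone : List.lookup p L = none := by
          rw [List.lookup_eq_none_iff]
          intro pair hpair
          rw [bne_iff_ne]
          intro he
          exact hp_nm (List.mem_map.mpr ⟨pair, hpair, he.symm⟩)
        rw [hlknone]
        dsimp only
        rw [if_neg (show ¬ (PySem.Str.startswith S[r] p = false) from by rw [hqk]; decide),
          if_neg hkp]
        rcases Nat.lt_or_ge (r + 1) S.length with hr1 | hr1
        · rw [List.getElem?_eq_getElem hr1]
          dsimp only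
          by_cases hq2 : PySem.Str.startswith S[r + 1] p = true
          · -- at least two matches: both sides are none
            have e1 : S.drop r = S[r] :: S[r + 1] :: S.drop (r + 2) := by
              rw [List.drop_eq_getElem_cons hr, List.drop_eq_getElem_cons hr1]
            have hSdec := List.take_append_drop r S
            rw [e1] at hSdec
            have h2le : 2 ≤ (S.filter (fun s => PySem.Str.startswith s p)).length := by
              rw [show (S.filter (fun s => PySem.Str.startswith s p)).length =
                  ((S.take r ++ S[r] :: S[r + 1] :: S.drop (r + 2)).filter
                    (fun s => PySem.Str.startswith s p)).length from by rw [hSdec]]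
              rw [List.filter_append, List.length_append,
                show List.filter (fun s => PySem.Str.startswith s p)
                    (S[r] :: S[r + 1] :: S.drop (r + 2))
                  = S[r] :: List.filter (fun s => PySem.Str.startswith s p)
                    (S[r + 1] :: S.drop (r + 2)) from List.filter_cons_of_pos hqk,
                show List.filter (fun s => PySem.Str.startswith s p)
                    (S[r + 1] :: S.drop (r + 2))
                  = S[r + 1] :: List.filter (fun s => PySem.Str.startswith s p)
                    (S.drop (r + 2)) from List.filter_cons_of_pos hq2,
                List.length_cons, List.length_cons]
              omega
            have hMF : (S.filter (fun s => PySem.Str.startswith s p)).Perm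
                ((L.filter (fun sp => PySem.Str.startswith sp.1 p)).map Prod.fst) := by
              have h := hperm.filter (fun s => PySem.Str.startswith s p)
              rw [pvFilter_map_fst] at h
              exact h
            have hF2 : ¬ (L.filter (fun sp => PySem.Str.startswith sp.1 p)).length = 1 := by
              have hl := hMF.length_eq
              rw [List.length_map] at hl
              omega
            rw [if_pos hq2, if_neg hF2]
          · -- unique match
            have hq2' : PySem.Str.startswith S[r + 1] p = false := by
              rw [← Bool.not_eq_true]; exact hq2
            obtain ⟨v, hlk, hF1, hhead⟩ := pvUniqueCase L p S r hperm hr hqk hq_below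
              (fun j hj hjge => hq_above (r + 1) hr1 (by omega) hq2' j hj hjge)
            rw [if_neg hq2, if_pos hF1, hhead, hlk]
            rfl
        · -- r + 1 = length: unique match, keys[r+1]? = none
          rw [List.getElem?_eq_none (by omega)]
          dsimp only
          obtain ⟨v, hlk, hF1, hhead⟩ := pvUniqueCase L p S r hperm hr hqk hq_below
            (fun j hj hjge => absurd hj (by omega))
          rw [if_pos hF1, hhead, hlk]
          rfl
    · -- the first key ≥ p does not start with p: no matches at all
      have hqk' : PySem.Str.startswith S[r] p = false := by
        rw [← Bool.not_eq_true]; exact hqk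
      obtain ⟨hlk, hF⟩ := pvEmptyCase L p S hperm (by
        intro j hj
        rcases Nat.lt_or_ge j r with hjr | hjr
        · exact hq_below j hj hjr
        · exact hq_above r hr (le_refl r) hqk' j hj hjr)
      rw [hlk]
      dsimp only
      rw [hF, if_pos hqk']
      rfl
  · -- r = length: every key is < p, no matches
    obtain ⟨hlk, hF⟩ := pvEmptyCase L p S hperm (fun j hj => hq_below j hj (by omega))
    rw [List.getElem?_eq_none hr, hlk]
    dsimp only
    rw [hF]
    rfl
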